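-- pv_equiv track=rewrite | github.com/1969-07-20/GoogleFoobarChallenge | OfflineTester/Level1_MinionWorkAssignments/solutionA.py | solution
-- ===== SOURCE A (Python) =====
-- def solution(data, n):
--     data_frequency = {}
--     adjusted_roster = []
--
--     for d in data:
--         if d not in data_frequency:
--             data_frequency[d] = 1
--         else:
--             data_frequency[d] += 1
--
--     for d in data:
--         if data_frequency[d] > n:
--             continue
--         else:
--             adjusted_roster.append(d)
--
--     return adjusted_roster
-- ===== SOURCE B (Python) =====
-- def solution(data, n):
--     # Group the positions of each value, keep the groups of size <= n,
--     # then rebuild the roster from the sorted kept positions.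
--     positions = {}
--     for i, d in enumerate(data):
--         positions.setdefault(d, []).append(i)
--     keep = sorted(i for idxs in positions.values() if len(idxs) <= n for i in idxs)
--     return [data[i] for i in keep]
-- ===== Notes on version B (the rewrite author's own statement) =====
-- stated objective: alternative
-- what changed: Instead of counting frequencies and filtering the data in a second pass, B groups the index positions of each value in one pass, keeps the position groups of size at most n, sorts the surviving indices and rebuilds the result by indexing into data.
import Mathlib
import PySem

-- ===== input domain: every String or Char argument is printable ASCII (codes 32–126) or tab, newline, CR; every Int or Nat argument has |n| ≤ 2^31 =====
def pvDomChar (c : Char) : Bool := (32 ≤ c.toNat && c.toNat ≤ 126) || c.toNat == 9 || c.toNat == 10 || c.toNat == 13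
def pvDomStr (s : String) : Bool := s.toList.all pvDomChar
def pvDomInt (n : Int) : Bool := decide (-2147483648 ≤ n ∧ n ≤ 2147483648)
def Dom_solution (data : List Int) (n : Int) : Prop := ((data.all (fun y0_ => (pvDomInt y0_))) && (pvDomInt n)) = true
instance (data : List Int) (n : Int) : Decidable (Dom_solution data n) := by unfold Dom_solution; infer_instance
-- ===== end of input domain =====

-- B replaces A's count-then-filter with grouping index positions by value,
-- keeping groups of size <= n and rebuilding from the sorted indices (alternative; not faster).


-- ===== PORT A =====
def solution (data : List Int) (n : Int) : List Int :=
  let data_frequency : PySem.Dict Int Int :=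
    data.foldl (fun df d =>
      if !(df.contains d) then df.insert d 1
      else df.insert d (df.getD d 0 + 1)) PySem.Dict.empty
  data.foldl (fun adjusted_roster d =>
    if data_frequency.getD d 0 > n then adjusted_roster
    else adjusted_roster ++ [d]) []

-- ===== PORT B =====
def solution_alt (data : List Int) (n : Int) : List Int :=
  let positions : PySem.Dict Int (List Int) :=
    (PySem.List.enumerate data).foldl
      (fun ps p => ps.modify p.2 [] (fun l => l ++ [p.1])) PySem.Dict.empty
  let keep : List Int :=
    PySem.List.sorted
      ((positions.values.filter (fun idxs => decide ((idxs.length : Int) ≤ n))).flatMap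
        (fun idxs => idxs))
      (fun i => i) false
  keep.map (fun i => PySem.List.pyGetD data i 0)

-- ===== PRECONDITION & SPEC =====
def Spec_solution (data : List Int) (n : Int) (out : List Int) : Prop := out = solution_alt data n
instance (data : List Int) (n : Int) (out : List Int) : Decidable (Spec_solution data n out) := by unfold Spec_solution; infer_instance

-- ===== CLAIM (what is proved, stated in full; the proofs are below) =====
def Claim_equal_solution : Prop := ∀ (data : List Int) (n : Int), Dom_solution data n → Spec_solution data n (solution data n)

-- ===== LEMMAS AND PROOFS =====

-- A's branching count step is the canonical insert-getD-add-one step.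
theorem stepA_eq :
    (fun (df : PySem.Dict Int Int) d =>
      if !(df.contains d) then df.insert d 1
      else df.insert d (df.getD d 0 + 1))
      = fun df d => df.insert d (df.getD d 0 + 1) := by
  funext df d
  by_cases hc : df.contains d = true
  · simp [hc]
  · simp only [Bool.not_eq_true] at hc
    simp [hc, PySem.Dict.getD_of_not_contains df 0 hc]

-- A ''continue''-shaped append loop is a filter on the negated test.
theorem loop2_filter (l : List Int) (p : Int → Prop) [DecidablePred p] (acc : List Int) :
    l.foldl (fun a d => if p d then a else a ++ [d]) acc
      = acc ++ l.filter (fun d => decide (¬ p d)) := by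
  have h : (fun (a : List Int) d => if p d then a else a ++ [d])
      = fun a d => if decide (¬ p d) then a ++ [d] else a := by
    funext a d; by_cases hp : p d <;> simp [hp]
  rw [h, PySem.List.foldl_append_if_eq_filter]

-- A computes the in-order filter by count ≤ n.
theorem solution_eq_filter (data : List Int) (n : Int) :
    solution data n = data.filter (fun d => decide ((data.count d : Int) ≤ n)) := by
  unfold solution
  rw [stepA_eq, loop2_filter]
  simp only [List.nil_append]
  apply List.filter_congr
  intro d _
  rw [PySem.Dict.getD_foldl_insert_add_one]
  simp [PySem.Dict.getD_empty]

-- Grouping permutation: concatenating, over distinct labels, the elements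
-- carrying each label is a permutation of the original list.
theorem group_perm : ∀ (S : List Int) (l : List (Int × Int)), S.Nodup →
    (∀ p ∈ l, p.2 ∈ S) →
    (S.flatMap (fun c => l.filter (fun p => p.2 == c))).Perm l
  | [], l, _, h => by
      have hl : l = [] := by
        cases l with
        | nil => rfl
        | cons p t => exact absurd (h p (List.mem_cons_self ..)) (List.not_mem_nil)
      simp [hl]
  | c :: S', l, hnd, h => by
      rw [List.nodup_cons] at hnd
      obtain ⟨hc, hndS'⟩ := hnd
      have hrec := group_perm S' (l.filter (fun p => !(p.2 == c))) hndS' (by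
        intro p hp
        rw [List.mem_filter] at hp
        obtain ⟨hpl, hpc⟩ := hp
        rcases List.mem_cons.mp (h p hpl) with h1 | h1
        · simp [h1] at hpc
        · exact h1)
      have heq : S'.flatMap (fun c' => l.filter (fun p => p.2 == c')) =
          S'.flatMap (fun c' =>
            (l.filter (fun p => !(p.2 == c))).filter (fun p => p.2 == c')) := by
        apply List.flatMap_congr
        intro c' hc'
        rw [List.filter_filter]
        apply List.filter_congr
        intro p _
        by_cases hp : p.2 = c'
        · have hne : c' ≠ c := fun hh => hc (hh ▸ hc')
          simp [hp, hne]
        · simp [hp]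
      simp only [List.flatMap_cons, heq]
      exact (List.Perm.append_left _ hrec).trans (List.filter_append_perm _ l)

-- B also computes the in-order filter by count ≤ n.
theorem alt_eq_filter (data : List Int) (n : Int) :
    solution_alt data n = data.filter (fun d => decide ((data.count d : Int) ≤ n)) := by
  have hdef : solution_alt data n =
      (PySem.List.sorted
        (((((PySem.List.enumerate data 0).foldl
              (fun ps p => ps.modify p.2 [] (fun t => t ++ [p.1]))
              PySem.Dict.empty).values.filter
                (fun idxs => decide ((idxs.length : Int) ≤ n))).flatMap
            (fun idxs => idxs)))
        (fun i => i) false).map (fun i => PySem.List.pyGetD data i 0) := rfl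
  rw [hdef]
  set l := PySem.List.enumerate data 0 with hl
  set q : Int → Bool := fun c => decide ((data.count c : Int) ≤ n) with hq
  set lq := l.filter (fun p => q p.2) with hlq
  set positions := l.foldl (fun ps p => ps.modify p.2 [] (fun t => t ++ [p.1]))
      PySem.Dict.empty with hpos
  -- the fold keyed by p.2 is the canonical grouping fold over swapped pairs
  have hswap : positions = (l.map (fun p => (p.2, p.1))).foldl
      (fun ps r => ps.modify r.1 [] (fun t => t ++ [r.2])) PySem.Dict.empty := by
    rw [List.foldl_map]
  have hgetD : ∀ c, positions.getD c [] =
      (l.filter (fun p => p.2 == c)).map (fun p => p.1) := by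
    intro c
    rw [hswap, PySem.Dict.getD_foldl_modify_append, PySem.Dict.getD_empty,
        List.filter_map, List.map_map]
    rfl
  have hkeys : positions.keys = PySem.Set.ofList data := by
    rw [hpos, PySem.Dict.keys_foldl_modify_key l (fun p => p.2) []
        (fun _ p => (fun t => t ++ [p.1]))]
    rw [PySem.List.map_snd_enumerate, PySem.Dict.keys_empty]
    rfl
  have hnodup : positions.keys.Nodup := by
    rw [hkeys]; exact PySem.Set.nodup_ofList data
  have hvalues : positions.values =
      (PySem.Set.ofList data).map (fun c => (l.filter (fun p => p.2 == c)).map (fun p => p.1)) := by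
    rw [PySem.Dict.values_eq_map_keys positions hnodup [], hkeys]
    exact List.map_congr_left (fun c _ => hgetD c)
  rw [hvalues]
  -- push the filter through the map; the size test is the count test
  rw [List.filter_map]
  have hpredq : ((PySem.Set.ofList data).filter
        ((fun idxs => decide ((idxs.length : Int) ≤ n)) ∘
          (fun c => (l.filter (fun p => p.2 == c)).map (fun p => p.1))))
      = (PySem.Set.ofList data).filter q := by
    apply List.filter_congr
    intro c _
    have hcount : ((l.filter (fun p => p.2 == c)).map (fun p : Int × Int => p.1)).length
        = data.count c := by
      rw [List.length_map, ← List.countP_eq_length_filter]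
      rw [List.count_eq_countP]
      conv_rhs => rw [← PySem.List.map_snd_enumerate data 0, List.countP_map]
      rfl
    simp only [Function.comp, hcount, hq]
  rw [hpredq, List.flatMap_map]
  set Sq := (PySem.Set.ofList data).filter q with hSq
  -- on kept labels, filtering l and filtering lq agree
  have hflat : Sq.flatMap (fun c => (l.filter (fun p => p.2 == c)).map (fun p => p.1))
      = (Sq.flatMap (fun c => lq.filter (fun p => p.2 == c))).map (fun p => p.1) := by
    rw [List.map_flatMap]
    apply List.flatMap_congr
    intro c hcS
    have hqc : q c = true := (List.mem_filter.mp hcS).2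
    congr 1
    rw [hlq, List.filter_filter]
    apply List.filter_congr
    intro p _
    by_cases hp : p.2 = c
    · simp [hp, hqc]
    · simp [hp]
  rw [hflat]
  -- the kept indices are a permutation of the in-order kept indices
  have hperm : (Sq.flatMap (fun c => lq.filter (fun p => p.2 == c))).Perm lq := by
    apply group_perm
    · exact (PySem.Set.nodup_ofList data).filter _
    · intro p hp
      rw [hlq, List.mem_filter] at hp
      obtain ⟨hpl, hpq⟩ := hp
      rw [hSq, List.mem_filter]
      constructor
      · rw [PySem.Set.mem_ofList]
        obtain ⟨k, hk, hpk⟩ := (PySem.List.mem_enumerate_iff data 0 p).mp hpl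
        rw [hpk]
        exact List.getElem_mem hk
      · exact hpq
  have hpairwise : (lq.map (fun p : Int × Int => p.1)).Pairwise (· < ·) := by
    apply List.pairwise_map.mpr
    exact (PySem.List.pairwise_lt_enumerate data 0).filter _
  have hsorted : PySem.List.sorted
      ((Sq.flatMap (fun c => lq.filter (fun p => p.2 == c))).map (fun p => p.1))
      (fun i => i) false = lq.map (fun p : Int × Int => p.1) := by
    apply PySem.List.sorted_eq_of_perm_of_pairwise_lt
    · exact (hperm.map _).symm
    · exact hpairwise
  rw [hsorted, List.map_map]
  -- reading data back at each kept index returns the kept element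
  have hread : lq.map ((fun i => PySem.List.pyGetD data i 0) ∘ (fun p : Int × Int => p.1))
      = lq.map (fun p => p.2) := by
    apply List.map_congr_left
    intro p hp
    have hpl : p ∈ l := List.mem_of_mem_filter hp
    obtain ⟨k, hk, hpk⟩ := (PySem.List.mem_enumerate_iff data 0 p).mp hpl
    subst hpk
    simp only [Function.comp, zero_add]
    rw [PySem.List.pyGetD_natCast, List.getD_eq_getElem data 0 hk]
  rw [hread, hlq]
  rw [show (fun p : Int × Int => q p.2) = (q ∘ fun p : Int × Int => p.2) from rfl]
  rw [← List.filter_map, PySem.List.map_snd_enumerate]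

-- ===== VERDICT (by name: the statement is the Claim_ definition above) =====
theorem solution_spec : Claim_equal_solution := by
  intro data n _
  show _ = _
  rw [solution_eq_filter, alt_eq_filter]
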